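-- pv_equiv track=rewrite | github.com/SantiagoRotman/bingo | src/bingo.py | no_repetidos
-- ===== SOURCE A (Python) =====
-- def no_repetidos(carton):
-- 	numeros = set()
-- 	for fila in carton:
-- 		for celda in fila:
-- 			if (celda in numeros) and celda != 0:
-- 				return False
-- 			numeros.add(celda)
-- 	return True
-- ===== SOURCE B (Python) =====
-- def no_repetidos(carton):
-- 	numeros = [c for fila in carton for c in fila if c != 0]
-- 	return len(numeros) == len(set(numeros))
-- ===== Notes on version B (the rewrite author's own statement) =====
-- stated objective: idiomatic
-- what changed: Replaces the incremental seen-set with early return by a two-phase flatten-nonzero-cells-then-compare len(list) vs len(set) cardinality check.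
import Mathlib
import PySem

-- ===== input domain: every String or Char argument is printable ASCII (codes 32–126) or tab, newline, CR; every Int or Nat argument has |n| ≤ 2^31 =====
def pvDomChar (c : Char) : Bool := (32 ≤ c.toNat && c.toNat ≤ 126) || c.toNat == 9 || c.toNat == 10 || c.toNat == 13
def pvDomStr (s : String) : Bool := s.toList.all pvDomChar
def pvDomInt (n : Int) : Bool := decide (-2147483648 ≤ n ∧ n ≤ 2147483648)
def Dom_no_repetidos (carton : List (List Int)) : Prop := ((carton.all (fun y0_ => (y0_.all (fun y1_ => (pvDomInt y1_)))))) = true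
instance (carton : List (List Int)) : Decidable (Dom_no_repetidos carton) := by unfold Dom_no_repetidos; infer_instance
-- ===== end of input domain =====

-- B replaces A's incremental seen-set with early return by flattening the nonzero
-- cells and comparing list length with set cardinality (idiomatic; same cost).

-- ===== PORT A =====
-- inner 'for celda in fila' loop: none = the 'return False' was taken
def noRepCells (s : PySem.Set Int) : List Int → Option (PySem.Set Int)
  | [] => some s
  | celda :: rest =>
    if celda ∈ s ∧ celda ≠ 0 then none
    else noRepCells (PySem.Set.add s celda) rest

-- outer 'for fila in carton' loop
def noRepRows (s : PySem.Set Int) : List (List Int) → Bool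
  | [] => true
  | fila :: rest =>
    match noRepCells s fila with
    | none => false
    | some s' => noRepRows s' rest

def no_repetidos (carton : List (List Int)) : Bool :=
  noRepRows PySem.Set.empty carton

-- ===== PORT B =====
def no_repetidos_alt (carton : List (List Int)) : Bool :=
  let numeros := carton.flatMap (fun fila => fila.filter (fun c => c != 0))
  numeros.length == (PySem.Set.ofList numeros).length

-- ===== PRECONDITION & SPEC =====
def Spec_no_repetidos (carton : List (List Int)) (out : Bool) : Prop := out = no_repetidos_alt carton
instance (carton : List (List Int)) (out : Bool) : Decidable (Spec_no_repetidos carton out) := by unfold Spec_no_repetidos; infer_instance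

-- ===== CLAIM (what is proved, stated in full; the proofs are below) =====
def Claim_equal_no_repetidos : Prop := ∀ (carton : List (List Int)), Dom_no_repetidos carton → Spec_no_repetidos carton (no_repetidos carton)

-- ===== LEMMAS AND PROOFS =====

-- the A-side inner loop, characterised
theorem noRepCells_eq (xs : List Int) (s : PySem.Set Int) :
    noRepCells s xs =
      if (xs.filter (fun c => c != 0)).Nodup ∧ (∀ c ∈ xs, c ≠ 0 → c ∉ s)
      then some (PySem.Set.update s xs) else none := by
  induction xs generalizing s with
  | nil => simp [noRepCells]
  | cons c xs ih =>
    by_cases hc : c ∈ s ∧ c ≠ 0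
    · rw [noRepCells, if_pos hc, if_neg]
      rintro ⟨-, h2⟩
      exact h2 c (List.mem_cons_self) hc.2 hc.1
    · rw [noRepCells, if_neg hc, ih, PySem.Set.update_cons]
      have hiff : ((xs.filter (fun c => c != 0)).Nodup ∧
            ∀ c' ∈ xs, c' ≠ 0 → c' ∉ PySem.Set.add s c) ↔
          (((c :: xs).filter (fun c => c != 0)).Nodup ∧
            ∀ c' ∈ c :: xs, c' ≠ 0 → c' ∉ s) := by
        by_cases h0 : c = 0
        · subst h0
          simp only [PySem.Set.mem_add, List.filter_cons, List.mem_cons,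
            bne_self_eq_false, Bool.false_eq_true, if_false]
          constructor
          · rintro ⟨h1, h2⟩
            exact ⟨h1, fun x hx hx0 => by
              rcases hx with rfl | hx
              · exact absurd rfl hx0
              · exact fun hm => h2 x hx hx0 (Or.inl hm)⟩
          · rintro ⟨h1, h2⟩
            refine ⟨h1, fun x hx hx0 => ?_⟩
            rintro (hm | rfl)
            · exact h2 x (Or.inr hx) hx0 hm
            · exact hx0 rfl
        · have hcs : c ∉ s := fun hm => hc ⟨hm, h0⟩
          have hb : ((c : Int) != 0) = true := by simp [bne, h0]
          simp only [PySem.Set.mem_add, List.filter_cons, hb, if_true,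
            List.nodup_cons, List.mem_filter, List.mem_cons]
          constructor
          · rintro ⟨h1, h2⟩
            refine ⟨⟨fun ⟨hm, _⟩ => h2 c hm h0 (Or.inr rfl), h1⟩, ?_⟩
            rintro x (rfl | hx) hx0
            · exact hcs
            · exact fun hm => h2 x hx hx0 (Or.inl hm)
          · rintro ⟨⟨hcf, h1⟩, h2⟩
            refine ⟨h1, fun x hx hx0 => ?_⟩
            rintro (hm | rfl)
            · exact h2 x (Or.inr hx) hx0 hm
            · exact hcf ⟨hx, trivial⟩
      rw [if_congr hiff rfl rfl]

-- the A-side outer loop, characterised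
theorem noRepRows_eq (rows : List (List Int)) (s : PySem.Set Int) :
    noRepRows s rows =
      decide ((((rows.flatMap id).filter (fun c => c != 0)).Nodup ∧
        ∀ c ∈ rows.flatMap id, c ≠ 0 → c ∉ s)) := by
  induction rows generalizing s with
  | nil => simp [noRepRows]
  | cons fila rest ih =>
    rw [noRepRows, noRepCells_eq]
    by_cases h : (fila.filter (fun c => c != 0)).Nodup ∧ ∀ c ∈ fila, c ≠ 0 → c ∉ s
    · rw [if_pos h]
      change noRepRows (PySem.Set.update s fila) rest = _
      rw [ih]
      obtain ⟨ha, hb⟩ := h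
      congr 1
      simp only [eq_iff_iff, List.flatMap_cons, id, List.filter_append,
        List.nodup_append, PySem.Set.mem_update, List.mem_append,
        List.mem_filter, bne_iff_ne]
      constructor
      · rintro ⟨h1, h2⟩
        refine ⟨⟨ha, h1, fun a haf b hbr hab => h2 b hbr.1 hbr.2 (Or.inr (hab ▸ haf.1))⟩, ?_⟩
        rintro c (hcf | hcr) hc0
        · exact hb c hcf hc0
        · exact fun hm => h2 c hcr hc0 (Or.inl hm)
      · rintro ⟨⟨-, h1, hdisj⟩, h2⟩
        refine ⟨h1, fun c hcr hc0 => ?_⟩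
        rintro (hm | hcf)
        · exact h2 c (Or.inr hcr) hc0 hm
        · exact hdisj c ⟨hcf, hc0⟩ c ⟨hcr, hc0⟩ rfl
    · rw [if_neg h]
      change false = _
      symm
      simp only [decide_eq_false_iff_not]
      rintro ⟨h1, h2⟩
      refine h ⟨?_, fun c hc hc0 => h2 c (by simp [List.flatMap_cons, List.mem_append, hc]) hc0⟩
      have := h1
      rw [List.flatMap_cons, List.filter_append, List.nodup_append] at this
      exact this.1

theorem flatMap_filter (carton : List (List Int)) :
    carton.flatMap (fun fila => fila.filter (fun c => c != 0)) =
      (carton.flatMap id).filter (fun c => c != 0) := by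
  induction carton with
  | nil => rfl
  | cons fila rest ih => simp [List.flatMap_cons, List.filter_append, ih]

theorem ofList_sublist {α : Type} [BEq α] [LawfulBEq α] (xs : List α) :
    (PySem.Set.ofList xs).Sublist xs := by
  induction xs using List.reverseRecOn with
  | nil => simp [PySem.Set.ofList_nil]
  | append_singleton xs x ih =>
    rw [PySem.Set.ofList_append_singleton, PySem.Set.add_eq_ite]
    split
    · exact ih.trans (List.sublist_append_left xs [x])
    · exact ih.append_right [x]

theorem len_eq_iff_nodup (xs : List Int) :
    (xs.length == (PySem.Set.ofList xs).length) = decide xs.Nodup := by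
  by_cases h : xs.Nodup
  · simp [PySem.Set.ofList_eq_self_of_nodup xs h, h]
  · simp only [h, decide_false, beq_eq_false_iff_ne]
    intro hlen
    have heq : PySem.Set.ofList xs = xs := (ofList_sublist xs).eq_of_length hlen.symm
    exact h (heq ▸ PySem.Set.nodup_ofList xs)

-- ===== VERDICT (by name: the statement is the Claim_ definition above) =====
theorem no_repetidos_spec : Claim_equal_no_repetidos := by
  intro carton _
  unfold Spec_no_repetidos no_repetidos no_repetidos_alt
  rw [noRepRows_eq, flatMap_filter, len_eq_iff_nodup]
  simp [PySem.Set.empty]
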